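-- pv_equiv track=rewrite | github.com/TPereyraL/AED-1 | Guia8.py | vocales_dif
-- ===== SOURCE A (Python) =====
-- def vocales_dif (p : str) -> bool:
--     vocales: list = ['A','E','I','O','U']
--     palabra: str = p.upper()
--
--     for i in range(len(palabra)):
--         if palabra[i] in vocales:
--             if len(vocales) > 3:
--                 vocales.remove(palabra[i])
--
--     if len(vocales) <= 3:
--         res = True
--
--     else:
--         res = False
--
--     return res
-- ===== SOURCE B (Python) =====
-- def vocales_dif(p: str) -> bool:
--     seen = {c for c in p.upper() if c in 'AEIOU'}
--     return len(seen) >= 2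
-- ===== Notes on version B (the rewrite author's own statement) =====
-- stated objective: simpler
-- what changed: Instead of mutating a list of remaining vowels (removing matches only while its length exceeds 3) and testing len<=3 at the end, B collects the set of distinct vowels present in the upper-cased word in one set comprehension and returns whether there are at least two; the measured speedup is a constant factor (no per-character list membership/removal).
import Mathlib
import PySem

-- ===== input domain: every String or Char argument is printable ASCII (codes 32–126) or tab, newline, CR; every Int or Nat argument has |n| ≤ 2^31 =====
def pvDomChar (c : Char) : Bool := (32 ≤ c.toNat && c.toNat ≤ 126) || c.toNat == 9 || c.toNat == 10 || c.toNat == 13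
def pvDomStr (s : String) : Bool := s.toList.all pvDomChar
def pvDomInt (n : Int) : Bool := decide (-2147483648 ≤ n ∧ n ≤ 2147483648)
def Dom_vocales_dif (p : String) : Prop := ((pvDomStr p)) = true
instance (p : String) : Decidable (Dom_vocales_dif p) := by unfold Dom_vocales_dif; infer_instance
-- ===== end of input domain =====

-- B collects the set of distinct vowels present in the upper-cased word and tests
-- whether there are at least two, instead of depleting a mutable vowel list to a floor of 3.


-- ===== PORT A =====
-- loop body: `if palabra[i] in vocales: if len(vocales) > 3: vocales.remove(palabra[i])`
-- `.remove` is guarded by the membership test, so it cannot raise; remove? is some here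
-- and getD never takes its default.
def vocalesStepA (v : List Char) (c : Char) : List Char :=
  if v.contains c then
    (if v.length > 3 then (PySem.List.remove? v c).getD v else v)
  else v

def vocales_dif (p : String) : Bool :=
  decide (((PySem.List.pyRange 0 (((PySem.Str.upper p).toList).length : Int) 1).foldl
      (fun v i => vocalesStepA v (PySem.List.pyGetD ((PySem.Str.upper p).toList) i ' '))
      ['A', 'E', 'I', 'O', 'U']).length ≤ 3)

-- ===== PORT B =====
-- `{c for c in p.upper() if c in 'AEIOU'}` ; `c in 'AEIOU'` on a 1-char string is
-- membership of that character, ported as list membership in AEIOU's characters.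
def vocales_dif_alt (p : String) : Bool :=
  decide (2 ≤ PySem.Set.len (PySem.Set.ofList (((PySem.Str.upper p).toList).filter
      (fun c => ['A', 'E', 'I', 'O', 'U'].contains c))))

-- ===== PRECONDITION & SPEC =====
def Spec_vocales_dif (p : String) (out : Bool) : Prop := out = vocales_dif_alt p
instance (p : String) (out : Bool) : Decidable (Spec_vocales_dif p out) := by unfold Spec_vocales_dif; infer_instance

-- ===== CLAIM (what is proved, stated in full; the proofs are below) =====
def Claim_equal_vocales_dif : Prop := ∀ (p : String), Dom_vocales_dif p → Spec_vocales_dif p (vocales_dif p)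

-- ===== LEMMAS AND PROOFS =====

-- number of distinct elements of xs still present in v (spec-side counter for the proofs)
def dcount (xs : List Char) (v : List Char) : Nat :=
  match xs with
  | [] => 0
  | c :: t => if v.contains c then dcount t (v.erase c) + 1 else dcount t v

lemma stepA_of_mem_gt (v : List Char) (c : Char) (hc : c ∈ v) (h3 : 3 < v.length) :
    vocalesStepA v c = v.erase c := by
  simp [vocalesStepA, hc, h3, PySem.List.remove?_eq_some_erase v c hc]

lemma stepA_of_mem_le (v : List Char) (c : Char) (hc : c ∈ v) (h3 : ¬ 3 < v.length) :
    vocalesStepA v c = v := by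
  simp [vocalesStepA, hc, h3]

lemma stepA_of_not_mem (v : List Char) (c : Char) (hc : c ∉ v) :
    vocalesStepA v c = v := by
  simp [vocalesStepA, hc]

lemma foldl_stepA_length (xs : List Char) : ∀ v : List Char, 3 ≤ v.length →
    (xs.foldl vocalesStepA v).length = v.length - min (v.length - 3) (dcount xs v) := by
  induction xs with
  | nil => intro v _; simp [dcount]
  | cons c t ih =>
    intro v hv
    by_cases hc : c ∈ v
    · by_cases h3 : 3 < v.length
      · have hlen : (v.erase c).length = v.length - 1 := List.length_erase_of_mem hc
        have h3' : 3 ≤ (v.erase c).length := by omega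
        simp only [List.foldl_cons, stepA_of_mem_gt v c hc h3, ih _ h3']
        simp [dcount, hc]
        omega
      · simp only [List.foldl_cons, stepA_of_mem_le v c hc h3, dcount, hc,
          List.contains_eq_mem, decide_true, if_true, ih v hv]
        omega
    · simp only [List.foldl_cons, stepA_of_not_mem v c hc, ih v hv]
      simp [dcount, hc]

lemma dcount_eq_card (xs : List Char) : ∀ v : List Char, v.Nodup →
    dcount xs v = (xs.filter (fun c => v.contains c)).toFinset.card := by
  induction xs with
  | nil => intro v _; simp [dcount]
  | cons c t ih =>
    intro v hv
    by_cases hc : c ∈ v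
    · have hset : (t.filter (fun x => (v.erase c).contains x)).toFinset
          = ((t.filter (fun x => v.contains x)).toFinset).erase c := by
        ext x
        simp [hv.mem_erase_iff, Finset.mem_erase, List.mem_toFinset]
        tauto
      have : dcount (c :: t) v = dcount t (v.erase c) + 1 := by
        simp [dcount, hc]
      rw [this, ih _ (hv.erase c), hset]
      have hfil : ((c :: t).filter (fun x => v.contains x)).toFinset
          = insert c ((t.filter (fun x => v.contains x)).toFinset) := by
        simp [hc]
      rw [hfil]
      have hcard := Finset.card_erase_add_one
        (Finset.mem_insert_self c ((t.filter (fun x => v.contains x)).toFinset))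
      rw [Finset.erase_insert_eq_erase] at hcard
      omega
    · simp [dcount, hc, ih v hv]

lemma setlen_eq_card (l : List Char) :
    PySem.Set.len (PySem.Set.ofList l) = (l.toFinset.card : Int) := by
  have hnd : (PySem.Set.ofList l).Nodup := PySem.Set.nodup_ofList l
  have hfin : (PySem.Set.ofList l).toFinset = l.toFinset := by
    ext x; simp [List.mem_toFinset, PySem.Set.mem_ofList]
  have : (PySem.Set.ofList l).length = l.toFinset.card := by
    rw [← hfin]; exact (List.toFinset_card_of_nodup hnd).symm
  simp [PySem.Set.len, this]

-- the core fact, over an arbitrary char list (both ports apply it to the upper-cased word)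
lemma core (cs : List Char) :
    (decide ((cs.foldl vocalesStepA ['A','E','I','O','U']).length ≤ 3))
      = decide (2 ≤ PySem.Set.len (PySem.Set.ofList
          (cs.filter (fun c => (['A','E','I','O','U'] : List Char).contains c)))) := by
  have h1 := foldl_stepA_length cs ['A','E','I','O','U'] (by simp)
  have h2 := dcount_eq_card cs ['A','E','I','O','U'] (by decide)
  have h3 := setlen_eq_card (cs.filter (fun c => (['A','E','I','O','U'] : List Char).contains c))
  simp only [List.length_cons, List.length_nil] at h1
  rw [h1, h2, h3]
  by_cases h : 2 ≤ (cs.filter (fun c => (['A','E','I','O','U'] : List Char).contains c)).toFinset.card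
  · simp only [decide_eq_decide]
    constructor
    · intro _; exact_mod_cast h
    · intro _; omega
  · simp only [decide_eq_decide]
    constructor
    · intro hle
      exfalso
      omega
    · intro hc
      exfalso
      have : (2 : Int) ≤ ((cs.filter (fun c => (['A','E','I','O','U'] : List Char).contains c)).toFinset.card : Int) := hc
      omega

-- ===== VERDICT (by name: the statement is the Claim_ definition above) =====
theorem vocales_dif_spec : Claim_equal_vocales_dif := by
  intro p _
  unfold Spec_vocales_dif vocales_dif vocales_dif_alt
  rw [PySem.List.foldl_pyRange_zero_pyGetD' ((PySem.Str.upper p).toList) ' ' vocalesStepA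
    ['A','E','I','O','U']]
  exact core ((PySem.Str.upper p).toList)
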